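-- pv_equiv track=rewrite | github.com/nedveder/neat-ai | lib/mymodule.py | valid_row
-- ===== SOURCE A (Python) =====
-- from typing import List, Optional
--
-- def get_blocks(row: List[int]) -> List[int]:
--     """
--     converts a row with 0s and 1s to a blocks list
--     :param row: row with 0s and 1s
--     :return: blocks list
--     """
--     blocks = list()
--     black_squares = 0
--     for num in row:
--         if num == 0 and black_squares != 0:
--             blocks.append(black_squares)
--             black_squares = 0
--         elif num == 1:
--             black_squares += 1
--     if black_squares > 0:
--         blocks.append(black_squares)
--     return blocks
--
-- def valid_row(n: int, row: List[int], blocks: List[int]) -> bool: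
--     """
--     checks if a beginning of a row of length n matches the blocks constraints
--     :param n: length of final row
--     :param row: the start of a row to check
--     :param blocks: constraints for a row
--     :return: True if valid, false otherwise
--     """
--     row_blocks = get_blocks(row)
--     if len(row_blocks) > len(blocks):
--         return False
--
--     if sum(row_blocks) + n - len(row) < sum(row_blocks):
--         return False
--
--     if len(row) == n:
--         return row_blocks == blocks
--
--     if len(row_blocks) == 0:
--         return True
--
--     for i in range(len(row_blocks) - 1):
--         if row_blocks[i] != blocks[i]:
--             return False
--
--     if row[-1] != 0:
--         return row_blocks[-1] <= blocks[len(row_blocks) - 1]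
--     return row_blocks[-1] == blocks[len(row_blocks) - 1]
-- ===== SOURCE B (Python) =====
-- from typing import List
--
-- def valid_row(n: int, row: List[int], blocks: List[int]) -> bool:
--     """Single streaming pass: judge each completed block lazily (one block of
--     delay, so the final block can be treated as partial) instead of building
--     the whole block list and comparing afterwards."""
--     j = 0            # index of the next block of `blocks` to satisfy
--     run = 0          # length of the current run of 1s
--     pending = None   # last completed run, not yet judged
--     for x in row:
--         if x == 1:
--             run += 1
--         elif x == 0 and run > 0:
--             if pending is not None:
--                 if j >= len(blocks) or pending != blocks[j]:
--                     return False
--                 j += 1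
--             pending = run
--             run = 0
--     if run > 0:
--         if pending is not None:
--             if j >= len(blocks) or pending != blocks[j]:
--                 return False
--             j += 1
--         pending = run
--     if len(row) == n:
--         if pending is None:
--             return j == len(blocks)
--         return j + 1 == len(blocks) and pending == blocks[j]
--     if n < len(row):
--         return False
--     if pending is None:
--         return True
--     if j >= len(blocks):
--         return False
--     if row[-1] != 0:
--         return pending <= blocks[j]
--     return pending == blocks[j]
-- ===== Notes on version B (the rewrite author's own statement) =====
-- stated objective: alternative
-- what changed: Replaces the build-get_blocks-then-compare structure by a single streaming pass over row that maintains a run length, a block index j and one pending (not yet judged) completed block, judging each block against blocks[j] as soon as the next one completes and deciding the trailing/last block at the end.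
import Mathlib
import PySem

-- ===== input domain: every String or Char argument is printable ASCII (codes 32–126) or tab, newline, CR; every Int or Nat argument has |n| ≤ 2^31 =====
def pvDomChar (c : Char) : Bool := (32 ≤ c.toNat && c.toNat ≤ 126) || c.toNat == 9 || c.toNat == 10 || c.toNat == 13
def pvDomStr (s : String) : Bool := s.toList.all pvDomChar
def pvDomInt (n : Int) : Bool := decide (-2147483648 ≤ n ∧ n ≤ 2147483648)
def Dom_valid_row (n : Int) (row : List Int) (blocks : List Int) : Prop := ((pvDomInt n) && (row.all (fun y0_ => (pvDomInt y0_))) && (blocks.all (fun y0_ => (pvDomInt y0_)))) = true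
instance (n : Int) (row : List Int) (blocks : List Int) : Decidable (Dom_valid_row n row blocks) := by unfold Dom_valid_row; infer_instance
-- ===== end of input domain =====

-- B replaces A's build-the-whole-block-list-then-compare structure by a single
-- streaming pass that judges each completed block on the fly (alternative
-- decomposition; same behaviour, no speed claim).

-- ===== PORT A =====
def get_blocks (row : List Int) : List Int :=
  let st := row.foldl (fun (s : List Int × Int) num =>
    if num = 0 ∧ s.2 ≠ 0 then (s.1 ++ [s.2], 0)
    else if num = 1 then (s.1, s.2 + 1)
    else s) ([], 0)
  if st.2 > 0 then st.1 ++ [st.2] else st.1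

def valid_row (n : Int) (row : List Int) (blocks : List Int) : Bool :=
  let rb := get_blocks row
  if rb.length > blocks.length then false
  else if rb.sum + n - (row.length : Int) < rb.sum then false
  else if (row.length : Int) = n then decide (rb = blocks)
  else if rb.length = 0 then true
  else if (List.range (rb.length - 1)).any (fun i => decide (rb.getD i 0 ≠ blocks.getD i 0)) then false
  else match PySem.List.pyGet? row (-1) with   -- row[-1]; row ≠ [] here since rb ≠ []
    | none => false                            -- unreachable
    | some last =>
      -- rb[-1] and blocks[len(rb)-1] with rb nonempty and len(rb) ≤ len(blocks): in-range getD
      if last ≠ 0 then decide (rb.getD (rb.length - 1) 0 ≤ blocks.getD (rb.length - 1) 0)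
      else decide (rb.getD (rb.length - 1) 0 = blocks.getD (rb.length - 1) 0)

-- ===== PORT B =====
-- the for-loop of Source B: state (j, run, pending); none = early `return False`
def altLoop (blocks : List Int) : List Int → Nat → Int → Option Int → Option (Nat × Int × Option Int)
  | [], j, run, pending => some (j, run, pending)
  | x :: xs, j, run, pending =>
    if x = 1 then altLoop blocks xs j (run + 1) pending
    else if x = 0 ∧ run > 0 then
      match pending with
      | none => altLoop blocks xs j 0 (some run)
      | some p =>
        if blocks.length ≤ j ∨ p ≠ blocks.getD j 0 then none
        else altLoop blocks xs (j + 1) 0 (some run)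
    else altLoop blocks xs j run pending

-- the tail of Source B after the trailing-run flush (row[-1] ported as getLast?)
def altEnd (n : Int) (row : List Int) (blocks : List Int) : Option (Nat × Option Int) → Bool
  | none => false
  | some (j, pending) =>
    if (row.length : Int) = n then
      match pending with
      | none => decide (j = blocks.length)
      | some p => decide (j + 1 = blocks.length ∧ p = blocks.getD j 0)
    else if n < (row.length : Int) then false
    else match pending with
      | none => true
      | some p =>
        if blocks.length ≤ j then false
        else match row.getLast? with
          | none => false                      -- unreachable: pending ≠ none forces row ≠ []
          | some last =>
            if last ≠ 0 then decide (p ≤ blocks.getD j 0)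
            else decide (p = blocks.getD j 0)

def valid_row_alt (n : Int) (row : List Int) (blocks : List Int) : Bool :=
  match altLoop blocks row 0 0 none with
  | none => false
  | some (j, run, pending) =>
    -- flush the trailing run (the `if run > 0:` block of Source B)
    altEnd n row blocks
      (if run > 0 then
        match pending with
        | none => some (j, some run)
        | some p =>
          if blocks.length ≤ j ∨ p ≠ blocks.getD j 0 then none
          else some (j + 1, some run)
      else some (j, pending))

-- ===== PRECONDITION & SPEC =====
def Spec_valid_row (n : Int) (row : List Int) (blocks : List Int) (out : Bool) : Prop := out = valid_row_alt n row blocks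
instance (n : Int) (row : List Int) (blocks : List Int) (out : Bool) : Decidable (Spec_valid_row n row blocks out) := by unfold Spec_valid_row; infer_instance

-- ===== CLAIM (what is proved, stated in full; the proofs are below) =====
def Claim_equal_valid_row : Prop := ∀ (n : Int) (row : List Int) (blocks : List Int), Dom_valid_row n row blocks → Spec_valid_row n row blocks (valid_row n row blocks)

-- ===== LEMMAS AND PROOFS =====

-- abstraction of A's fold: (completed runs, final run) from start-run `black`
def runsF : List Int → Int → List Int × Int
  | [], black => ([], black)
  | x :: xs, black =>
    if x = 0 ∧ black ≠ 0 then
      let r := runsF xs 0; (black :: r.1, r.2)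
    else if x = 1 then runsF xs (black + 1)
    else runsF xs black

-- abstraction of B's judging: consume completed runs one block of delay behind
def judge (blocks : List Int) : Nat → Option Int → List Int → Option (Nat × Option Int)
  | j, pending, [] => some (j, pending)
  | j, none, r :: rs => judge blocks j (some r) rs
  | j, some p, r :: rs =>
    if blocks.length ≤ j ∨ p ≠ blocks.getD j 0 then none
    else judge blocks (j + 1) (some r) rs

theorem get_blocks_eq (row : List Int) :
    get_blocks row =
      (if (runsF row 0).2 > 0 then (runsF row 0).1 ++ [(runsF row 0).2] else (runsF row 0).1) := by
  have h : ∀ (l : List Int) (bs : List Int) (black : Int),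
      l.foldl (fun (s : List Int × Int) num =>
        if num = 0 ∧ s.2 ≠ 0 then (s.1 ++ [s.2], 0)
        else if num = 1 then (s.1, s.2 + 1)
        else s) (bs, black) = (bs ++ (runsF l black).1, (runsF l black).2) := by
    intro l
    induction l with
    | nil => intro bs black; simp [runsF]
    | cons x xs ih =>
      intro bs black
      simp only [List.foldl_cons, runsF]
      by_cases h0 : x = 0 ∧ black ≠ 0
      · simp [h0, ih]
      · by_cases h1 : x = 1
        · simp [h0, h1, ih]
        · simp [h0, h1, ih]
  simp [get_blocks, h]

theorem altLoop_eq (blocks : List Int) (row : List Int) :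
    ∀ (j : Nat) (run : Int) (pending : Option Int), 0 ≤ run →
    altLoop blocks row j run pending =
      (judge blocks j pending (runsF row run).1).map
        (fun jp => (jp.1, (runsF row run).2, jp.2)) := by
  induction row with
  | nil =>
    intro j run pending _
    cases pending <;> simp [altLoop, runsF, judge]
  | cons x xs ih =>
    intro j run pending hrun
    by_cases h1 : x = 1
    · have h0 : ¬ (x = 0 ∧ run ≠ 0) := by rintro ⟨h, _⟩; omega
      simp only [altLoop, runsF, h1]
      exact ih j (run + 1) pending (by omega)
    · by_cases h0 : x = 0 ∧ run > 0
      · have h0' : x = 0 ∧ run ≠ 0 := ⟨h0.1, by omega⟩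
        simp only [altLoop, runsF, if_neg h1, if_pos h0, if_pos h0']
        cases pending with
        | none =>
          simp only [judge]
          exact ih j 0 (some run) (by omega)
        | some p =>
          simp only [judge]
          by_cases hg : blocks.length ≤ j ∨ p ≠ blocks.getD j 0
          · rw [if_pos hg, if_pos hg]; simp
          · rw [if_neg hg, if_neg hg]
            exact ih (j + 1) 0 (some run) (by omega)
      · have h0' : ¬ (x = 0 ∧ run ≠ 0) := by rintro ⟨h, hb⟩; exact h0 ⟨h, by omega⟩
        simp only [altLoop, runsF, if_neg h1, if_neg h0, if_neg h0']
        exact ih j run pending hrun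

theorem judge_append (blocks : List Int) (rs ts : List Int) :
    ∀ (j : Nat) (pending : Option Int),
    judge blocks j pending (rs ++ ts) =
      (judge blocks j pending rs).bind (fun jp => judge blocks jp.1 jp.2 ts) := by
  induction rs with
  | nil => intro j pending; cases pending <;> simp [judge]
  | cons r rs ih =>
    intro j pending
    cases pending with
    | none => simpa [judge] using ih j (some r)
    | some p =>
      simp only [List.cons_append, judge]
      by_cases hg : blocks.length ≤ j ∨ p ≠ blocks.getD j 0
      · rw [if_pos hg, if_pos hg]; simp
      · rw [if_neg hg, if_neg hg]; exact ih (j + 1) (some r)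

theorem judge_some_eq (blocks : List Int) (rs : List Int) :
    ∀ (j : Nat) (p : Int),
    judge blocks j (some p) rs =
      (if ∀ i < rs.length, ((p :: rs).getD i 0 = blocks.getD (j + i) 0 ∧ j + i < blocks.length)
       then some (j + rs.length, some ((p :: rs).getD rs.length 0))
       else none) := by
  induction rs with
  | nil => intro j p; simp [judge]
  | cons r rs ih =>
    intro j p
    simp only [judge]
    rw [ih (j + 1) r]
    by_cases hg : blocks.length ≤ j ∨ p ≠ blocks.getD j 0
    · rw [if_pos hg]
      have hCC : ¬ (∀ i < (r :: rs).length,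
          ((p :: r :: rs).getD i 0 = blocks.getD (j + i) 0 ∧ j + i < blocks.length)) := by
        intro hC
        have h0 := hC 0 (Nat.succ_pos _)
        simp only [List.getD_cons_zero, Nat.add_zero] at h0
        rcases hg with hg | hg
        · omega
        · exact hg h0.1
      rw [if_neg hCC]
    · rw [if_neg hg]
      push_neg at hg
      by_cases hC : ∀ i < rs.length,
          ((r :: rs).getD i 0 = blocks.getD (j + 1 + i) 0 ∧ j + 1 + i < blocks.length)
      · have hCC : ∀ i < (r :: rs).length,
            ((p :: r :: rs).getD i 0 = blocks.getD (j + i) 0 ∧ j + i < blocks.length) := by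
          intro i hi
          cases i with
          | zero => simpa using ⟨hg.2, by omega⟩
          | succ k =>
            have hk := hC k (by simpa using hi)
            have e : j + (k + 1) = j + 1 + k := by omega
            simp only [List.getD_cons_succ, e]
            exact hk
        rw [if_pos hC, if_pos hCC]
        simp only [List.length_cons, List.getD_cons_succ]
        congr 2
        omega
      · have hCC : ¬ (∀ i < (r :: rs).length,
            ((p :: r :: rs).getD i 0 = blocks.getD (j + i) 0 ∧ j + i < blocks.length)) := by
          intro hC'
          apply hC
          intro i hi
          have h := hC' (i + 1) (by simp; omega)
          rw [List.getD_cons_succ] at h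
          have e : j + (i + 1) = j + 1 + i := by omega
          rw [e] at h
          exact h
        rw [if_neg hC, if_neg hCC]

theorem list_eq_iff_getD (xs ys : List Int) :
    xs = ys ↔ (xs.length = ys.length ∧ ∀ i < xs.length, xs.getD i 0 = ys.getD i 0) := by
  constructor
  · rintro rfl; exact ⟨rfl, fun _ _ => rfl⟩
  · rintro ⟨hlen, h⟩
    apply List.ext_getElem hlen
    intro i hi hi'
    have := h i hi
    rwa [List.getD_eq_getElem xs 0 hi, List.getD_eq_getElem ys 0 hi'] at this

theorem alt_eq (n : Int) (row : List Int) (blocks : List Int) :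
    valid_row_alt n row blocks = altEnd n row blocks (judge blocks 0 none (get_blocks row)) := by
  unfold valid_row_alt
  rw [altLoop_eq blocks row 0 0 none le_rfl, get_blocks_eq]
  cases hj : judge blocks 0 none (runsF row 0).1 with
  | none =>
    simp only [Option.map_none]
    by_cases hr : (runsF row 0).2 > 0
    · rw [if_pos hr, judge_append, hj]; simp [altEnd]
    · rw [if_neg hr, hj]; simp [altEnd]
  | some jp =>
    obtain ⟨j, pending⟩ := jp
    simp only [Option.map_some]
    by_cases hr : (runsF row 0).2 > 0
    · simp only [if_pos hr]
      rw [judge_append, hj]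
      simp only [Option.bind_some]
      cases pending with
      | none => simp [judge]
      | some p => simp only [judge]
    · simp only [if_neg hr]
      rw [hj]

theorem a_eq (n : Int) (row : List Int) (blocks : List Int) :
    valid_row n row blocks = altEnd n row blocks (judge blocks 0 none (get_blocks row)) := by
  simp only [valid_row]
  cases hcase : get_blocks row with
  | nil =>
    simp only [judge, altEnd, List.length_nil, List.sum_nil]
    rw [if_neg (show ¬((0:Nat) > blocks.length) by omega)]
    by_cases h2 : (row.length:Int) = n
    · simp only [if_neg (show ¬((0:Int) + n - (row.length:Int) < 0) by omega), if_pos h2]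
      simp [List.length_eq_zero_iff, eq_comm]
    · simp only [if_neg h2]
      by_cases h3 : n < (row.length:Int)
      · simp only [if_pos (show (0:Int) + n - (row.length:Int) < 0 by omega), if_pos h3]
      · simp only [if_neg (show ¬((0:Int) + n - (row.length:Int) < 0) by omega), if_neg h3]
        simp
  | cons h t =>
    have hJ : judge blocks 0 none (h :: t) =
        (if ∀ i < t.length, ((h :: t).getD i 0 = blocks.getD i 0 ∧ i < blocks.length)
         then some (t.length, some ((h :: t).getD t.length 0))
         else none) := by
      have := judge_some_eq blocks t 0 h
      simp only [Nat.zero_add] at this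
      simpa only [judge] using this
    rw [hJ]
    by_cases hC : ∀ i < t.length, ((h :: t).getD i 0 = blocks.getD i 0 ∧ i < blocks.length)
    · simp only [if_pos hC, altEnd]
      by_cases h1 : (h :: t).length > blocks.length
      · simp only [if_pos h1]
        have hlen : blocks.length ≤ t.length := by simp only [List.length_cons] at h1; omega
        by_cases h2 : (row.length:Int) = n
        · simp only [if_pos h2]
          symm
          simp only [decide_eq_false_iff_not]
          rintro ⟨e, _⟩
          omega
        · simp only [if_neg h2]
          by_cases h3 : n < (row.length:Int)
          · simp only [if_pos h3]
          · simp only [if_neg h3, if_pos hlen]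
      · have hbl : t.length < blocks.length := by
          simp only [List.length_cons] at h1; omega
        simp only [if_neg h1]
        by_cases h3 : n < (row.length:Int)
        · have h2 : ¬((row.length:Int) = n) := by omega
          simp only [if_pos (show (h :: t).sum + n - (row.length:Int) < (h :: t).sum by omega),
            if_neg h2, if_pos h3]
        · simp only [if_neg (show ¬((h :: t).sum + n - (row.length:Int) < (h :: t).sum) by omega)]
          by_cases h2 : (row.length:Int) = n
          · simp only [if_pos h2]
            simp only [decide_eq_decide]
            rw [list_eq_iff_getD]
            constructor
            · rintro ⟨hl, he⟩
              refine ⟨by simpa using hl, ?_⟩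
              simpa using he t.length (by simp)
            · rintro ⟨hl, he⟩
              refine ⟨by simpa using hl, ?_⟩
              intro i hi
              rcases Nat.lt_or_ge i t.length with hi' | hi'
              · exact (hC i hi').1
              · have hieq : i = t.length := by
                  simp only [List.length_cons] at hi; omega
                rw [hieq]; exact he
          · simp only [if_neg h2, if_neg h3, if_neg (show ¬((h :: t).length = 0) by simp)]
            have hany : ((List.range ((h :: t).length - 1)).any
                (fun i => decide ((h :: t).getD i 0 ≠ blocks.getD i 0))) = false := by
              simp only [List.any_eq_false]
              intro i hi
              simp only [List.mem_range, List.length_cons, Nat.add_sub_cancel] at hi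
              simpa using (hC i hi).1
            simp only [hany, Bool.false_eq_true, if_false]
            rw [PySem.List.pyGet?_neg_one]
            simp only [if_neg (show ¬(blocks.length ≤ t.length) by omega)]
            cases row.getLast? with
            | none => rfl
            | some last =>
              by_cases hl : last ≠ 0
              · simp only [if_pos hl, List.length_cons, Nat.add_sub_cancel]
              · simp only [if_neg hl, List.length_cons, Nat.add_sub_cancel]
    · simp only [if_neg hC, altEnd]
      push_neg at hC
      obtain ⟨i, hi, hbad⟩ := hC
      by_cases h1 : (h :: t).length > blocks.length
      · simp only [if_pos h1]
      · have hibl : i < blocks.length := by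
          simp only [List.length_cons] at h1; omega
        have hmis : (h :: t).getD i 0 ≠ blocks.getD i 0 := by
          intro e; have := hbad e; omega
        by_cases h3 : n < (row.length:Int)
        · simp only [if_neg h1,
            if_pos (show (h :: t).sum + n - (row.length:Int) < (h :: t).sum by omega)]
        · simp only [if_neg h1,
            if_neg (show ¬((h :: t).sum + n - (row.length:Int) < (h :: t).sum) by omega)]
          by_cases h2 : (row.length:Int) = n
          · simp only [if_pos h2]
            have hne : ¬((h :: t) = blocks) := by
              intro e
              rw [list_eq_iff_getD] at e
              exact hmis (e.2 i (by simp only [List.length_cons]; omega))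
            simp [hne]
          · simp only [if_neg h2, if_neg (show ¬((h :: t).length = 0) by simp)]
            have hany : ((List.range ((h :: t).length - 1)).any
                (fun i => decide ((h :: t).getD i 0 ≠ blocks.getD i 0))) = true := by
              simp only [List.any_eq_true]
              exact ⟨i, by simp only [List.mem_range, List.length_cons, Nat.add_sub_cancel]; omega,
                by simpa using hmis⟩
            simp only [hany, if_true]

theorem valid_row_spec : Claim_equal_valid_row := by
  intro n row blocks _
  unfold Spec_valid_row
  rw [a_eq, alt_eq]
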